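-- pv_equiv track=rewrite | github.com/ama10047/Reproducbility-Challenge-SCC23 | sbc.py | replicate
-- ===== SOURCE A (Python) =====
-- def replicate(patterns, r, n):
--     result = [ [None] * n for _ in range(n) ]
--
--     def apply_pattern(pattern, start_x, start_y):
--         for u in range(r):
--             for v in range(r):
--                 result[start_x+u][start_y+v] = pattern[u][v]
--
--     if n % r != 0:
--         raise ValueError("Replication: n should be a multiple of r, here n=%d and r=%d" % (n, r))
--     repetitions = n // r
--     idx = 0
--     for i in range(0, n, r):
--         for j in range(i, n, r):
--             apply_pattern(patterns[idx], i, j)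
--             if i != j:
--                 apply_pattern(patterns[idx], j, i)
--             idx = (idx + 1) % len(patterns)
--     return result
-- ===== SOURCE B (Python) =====
-- def replicate(patterns, r, n):
--     if n % r != 0:
--         raise ValueError("Replication: n should be a multiple of r, here n=%d and r=%d" % (n, r))
--     b = n // r
--     m = len(patterns)
--     table = [[0] * b for _ in range(b)]
--     idx = 0
--     for bi in range(b):
--         for bj in range(bi, b):
--             table[bi][bj] = idx
--             table[bj][bi] = idx
--             idx = (idx + 1) % m
--     return [[patterns[table[x // r][y // r]][x % r][y % r] for y in range(n)]
--             for x in range(n)]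
-- ===== Notes on version B (the rewrite author's own statement) =====
-- stated objective: alternative
-- what changed: Instead of A's in-place nested block loops with a mirroring apply_pattern helper, B first builds a b×b table of pattern indices over the upper triangle (with the same idx cycling) and then renders the grid in one flat per-cell pass result[x][y]=patterns[table[x//r][y//r]][x%r][y%r].
-- outside the precondition, e.g. on replicate([[[2]]], -1, 2): A returns [[None, None], [None, None]], B raises IndexError
import Mathlib
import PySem

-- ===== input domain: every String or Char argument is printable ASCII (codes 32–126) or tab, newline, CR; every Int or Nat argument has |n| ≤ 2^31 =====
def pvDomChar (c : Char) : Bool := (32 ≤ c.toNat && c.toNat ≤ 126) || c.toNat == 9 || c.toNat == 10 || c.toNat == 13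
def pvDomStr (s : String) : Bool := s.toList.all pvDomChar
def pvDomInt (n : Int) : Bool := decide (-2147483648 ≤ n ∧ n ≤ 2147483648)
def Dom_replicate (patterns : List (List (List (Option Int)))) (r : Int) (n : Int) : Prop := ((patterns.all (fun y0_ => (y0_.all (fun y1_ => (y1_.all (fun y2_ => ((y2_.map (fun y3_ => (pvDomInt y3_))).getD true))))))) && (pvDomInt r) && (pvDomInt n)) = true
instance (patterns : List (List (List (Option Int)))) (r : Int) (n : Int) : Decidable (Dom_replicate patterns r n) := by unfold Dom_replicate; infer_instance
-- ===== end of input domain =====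

-- B replaces A's in-place nested block loops (with a mirroring apply_pattern helper) by first
-- building a b×b table of pattern indices over the upper triangle and then rendering the whole
-- grid in one flat per-cell pass (objective: alternative decomposition, same cost).

-- ===== PORT A =====
-- result[start_x+u][start_y+v] = pattern[u][v], step for step (reads/writes via PySem, exact on in-range indices; Pre_ keeps them in range)
def applyPatP (r : Int) (pat : List (List (Option Int))) (sx sy : Int)
    (g : List (List (Option Int))) : List (List (Option Int)) :=
  (PySem.List.pyRange 0 r 1).foldl (fun g u =>
    (PySem.List.pyRange 0 r 1).foldl (fun g v =>
      PySem.List.pySetD g (sx + u)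
        (PySem.List.pySetD (PySem.List.pyGetD g (sx + u) []) (sy + v)
          (PySem.List.pyGetD (PySem.List.pyGetD pat u []) v none))) g) g

-- the body of A's inner loop: apply at (i,j), mirror at (j,i) when i≠j, advance idx
def bodyA (patterns : List (List (List (Option Int)))) (r : Int)
    (st : List (List (Option Int)) × Int) (i j : Int) : List (List (Option Int)) × Int :=
  let pat := PySem.List.pyGetD patterns st.2 []
  let g := applyPatP r pat i j st.1
  let g := if i ≠ j then applyPatP r pat j i g else g
  (g, PySem.Int.mod (st.2 + 1) (patterns.length : Int))

def replicate (patterns : List (List (List (Option Int)))) (r : Int) (n : Int) : List (List (Option Int)) :=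
  let result := (PySem.List.pyRange 0 n 1).map (fun _ => PySem.List.pyRepeat [(none : Option Int)] n)
  if PySem.Int.mod n r ≠ 0 then []   -- Python raises ValueError here; excluded by Pre_
  else
    let _repetitions := PySem.Int.floordiv n r
    ((PySem.List.pyRange 0 n r).foldl (fun st i =>
      (PySem.List.pyRange i n r).foldl (fun st j => bodyA patterns r st i j) st)
      (result, (0 : Int))).1

-- ===== PORT B =====
-- the body of B's table loop: table[bi][bj] = table[bj][bi] = idx, advance idx
def bodyB (m : Int) (st : List (List Int) × Int) (bi bj : Int) : List (List Int) × Int :=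
  let t := PySem.List.pySetD st.1 bi (PySem.List.pySetD (PySem.List.pyGetD st.1 bi []) bj st.2)
  let t := PySem.List.pySetD t bj (PySem.List.pySetD (PySem.List.pyGetD t bj []) bi st.2)
  (t, PySem.Int.mod (st.2 + 1) m)

def replicate_alt (patterns : List (List (List (Option Int)))) (r : Int) (n : Int) : List (List (Option Int)) :=
  if PySem.Int.mod n r ≠ 0 then []   -- Python raises ValueError here; excluded by Pre_
  else
    let b := PySem.Int.floordiv n r
    let m := (patterns.length : Int)
    let table0 := (PySem.List.pyRange 0 b 1).map (fun _ => PySem.List.pyRepeat [(0 : Int)] b)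
    let st := (PySem.List.pyRange 0 b 1).foldl (fun st bi =>
      (PySem.List.pyRange bi b 1).foldl (fun st bj => bodyB m st bi bj) st) (table0, (0 : Int))
    (PySem.List.pyRange 0 n 1).map (fun x =>
      (PySem.List.pyRange 0 n 1).map (fun y =>
        PySem.List.pyGetD (PySem.List.pyGetD
          (PySem.List.pyGetD patterns
            (PySem.List.pyGetD (PySem.List.pyGetD st.1 (PySem.Int.floordiv x r) [])
              (PySem.Int.floordiv y r) 0) [])
          (PySem.Int.mod x r) []) (PySem.Int.mod y r) none))

-- ===== PRECONDITION & SPEC =====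
-- Pre_ excludes exactly the inputs where Python A raises (r = 0 or n not a multiple of r:
-- ZeroDivisionError/ValueError; n > 0 with empty patterns or a used pattern smaller than r×r:
-- IndexError; n < 0 with r < 0 and empty patterns: ZeroDivisionError) plus one region where
-- A RETURNS an artefact: for r < 0 with r ∣ n and n > 0 every loop of A is empty and it returns
-- the untouched all-None grid, where B's natural per-cell pass raises IndexError (see cites).
def Pre_replicate (patterns : List (List (List (Option Int)))) (r : Int) (n : Int) : Prop :=
  r ≠ 0 ∧ PySem.Int.mod n r = 0 ∧
  (0 < n → 0 < r ∧ patterns ≠ [] ∧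
    (∀ p ∈ patterns.take (min patterns.length ((n / r).toNat * ((n / r).toNat + 1) / 2)),
      r.toNat ≤ p.length ∧ ∀ row ∈ p.take r.toNat, r.toNat ≤ row.length)) ∧
  (n < 0 → r < 0 → patterns ≠ [])
instance (patterns : List (List (List (Option Int)))) (r : Int) (n : Int) : Decidable (Pre_replicate patterns r n) := by unfold Pre_replicate; infer_instance

def pvWitness_replicate : List (List (List (Option Int))) × Int × Int :=
  ([[[some 1, some 2], [none, some 3]]], 2, 4)

def Spec_replicate (patterns : List (List (List (Option Int)))) (r : Int) (n : Int) (out : List (List (Option Int))) : Prop := out = replicate_alt patterns r n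
instance (patterns : List (List (List (Option Int)))) (r : Int) (n : Int) (out : List (List (Option Int))) : Decidable (Spec_replicate patterns r n out) := by unfold Spec_replicate; infer_instance

-- ===== CLAIM (what is proved, stated in full; the proofs are below) =====
def Claim_equal_replicate : Prop := ∀ (patterns : List (List (List (Option Int)))) (r : Int) (n : Int), Dom_replicate patterns r n → Pre_replicate patterns r n → Spec_replicate patterns r n (replicate patterns r n)

-- ===== LEMMAS AND PROOFS =====

-- ---------- generic helpers ----------
theorem pvFoldlInv {alpha beta : Type} {P : beta → Prop} (l : List alpha) (f : beta → alpha → beta)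
    (init : beta) (h0 : P init) (h : ∀ st x, P st → P (f st x)) : P (l.foldl f init) := by
  induction l generalizing init with
  | nil => exact h0
  | cons a t ih => exact ih _ (h _ _ h0)

theorem pySetD_nil {alpha : Type} (i : Int) (v : alpha) : PySem.List.pySetD ([] : List alpha) i v = [] := by
  unfold PySem.List.pySetD PySem.List.pySet?
  rcases h : (PySem.List.pyIdx? ([] : List alpha).length i) with _ | k <;> simp

-- 2D access/update (proof-side view of the ports' row-get / element-set pattern)
def aget {alpha : Type} (d : alpha) (g : List (List alpha)) (x y : Nat) : alpha := (g.getD x []).getD y d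
def aset {alpha : Type} (g : List (List alpha)) (x y : Nat) (v : alpha) : List (List alpha) :=
  g.set x ((g.getD x []).set y v)

theorem length_aset {alpha : Type} (g : List (List alpha)) (x y : Nat) (v : alpha) :
    (aset g x y v).length = g.length := List.length_set

theorem getD_set_self {alpha : Type} {g : List alpha} {x : Nat} (v d : alpha)
    (hx : x < g.length) : (g.set x v).getD x d = v := by
  rw [List.getD_eq_getElem?_getD, List.getElem?_set_self hx]
  rfl

theorem getD_set_ne {alpha : Type} {g : List alpha} {x x' : Nat} (v d : alpha)
    (h : x' ≠ x) : (g.set x v).getD x' d = g.getD x' d := by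
  rw [List.getD_eq_getElem?_getD, List.getElem?_set_ne (by omega), ← List.getD_eq_getElem?_getD]

theorem getD_elem {alpha : Type} {g : List alpha} {x : Nat} (d : alpha) (hx : x < g.length) :
    g.getD x d = g[x] := by
  rw [List.getD_eq_getElem?_getD, List.getElem?_eq_getElem hx]
  rfl

theorem getD_mem_or_nil {alpha : Type} (g : List (List alpha)) (x : Nat) :
    g.getD x [] ∈ g ∨ g.getD x [] = ([] : List alpha) := by
  by_cases hx : x < g.length
  · left
    rw [getD_elem _ hx]
    exact List.getElem_mem hx
  · right
    rw [List.getD_eq_getElem?_getD, List.getElem?_eq_none (by omega)]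
    rfl

theorem rows_aset {alpha : Type} {g : List (List alpha)} {N : Nat} (h : ∀ row ∈ g, row.length = N)
    {x : Nat} (y : Nat) (v : alpha) (hx : x < g.length) : ∀ row ∈ aset g x y v, row.length = N := by
  intro row hrow
  rcases List.mem_or_eq_of_mem_set hrow with h1 | h1
  · exact h row h1
  · subst h1
    rw [List.length_set, getD_elem _ hx]
    exact h _ (List.getElem_mem hx)

theorem aget_aset_self {alpha : Type} {d : alpha} {g : List (List alpha)} {x y : Nat} {v : alpha}
    (hx : x < g.length) (hy : y < (g.getD x []).length) : aget d (aset g x y v) x y = v := by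
  unfold aget aset
  rw [getD_set_self _ _ (by simpa using hx), getD_set_self _ _ hy]

theorem aget_aset_ne {alpha : Type} (d : alpha) (g : List (List alpha)) {x y x' y' : Nat} (v : alpha)
    (h : x' ≠ x ∨ y' ≠ y) : aget d (aset g x y v) x' y' = aget d g x' y' := by
  unfold aget aset
  by_cases hx : x' = x
  · subst hx
    have hy : y' ≠ y := by tauto
    by_cases hlt : x' < g.length
    · rw [getD_set_self _ _ (by simpa using hlt), getD_set_ne _ _ hy]
    · rw [List.set_eq_of_length_le (by omega)]
  · rw [getD_set_ne _ _ hx]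

theorem getD_mem_or_d {alpha : Type} (l : List alpha) (x : Nat) (d : alpha) :
    l.getD x d ∈ l ∨ l.getD x d = d := by
  by_cases hx : x < l.length
  · left
    rw [getD_elem _ hx]
    exact List.getElem_mem hx
  · right
    rw [List.getD_eq_getElem?_getD, List.getElem?_eq_none (by omega)]
    rfl

theorem aget_nonneg {M : List (List Int)} (h : ∀ row ∈ M, ∀ v ∈ row, 0 ≤ v) (p q : Nat) :
    0 ≤ aget 0 M p q := by
  unfold aget
  rcases getD_mem_or_nil M p with hm | hm
  · rcases getD_mem_or_d (M.getD p []) q 0 with h2 | h2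
    · exact h _ hm _ h2
    · rw [h2]
  · rw [hm]
    simp

-- block arithmetic
theorem div_eq_iff_block {R : Nat} (hR : 0 < R) (p x : Nat) :
    x / R = p ↔ R * p ≤ x ∧ x < R * p + R := by
  have h1 := Nat.div_add_mod x R
  have h2 := Nat.mod_lt x hR
  constructor
  · intro h
    subst h
    omega
  · intro h
    have hle : p ≤ x / R := by
      by_contra hc
      push Not at hc
      have h3 : R * (x / R + 1) ≤ R * p := Nat.mul_le_mul_left R hc
      rw [Nat.mul_succ] at h3
      omega
    have hlt : x / R < p + 1 := by
      by_contra hc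
      push Not at hc
      have h3 : R * (p + 1) ≤ R * (x / R) := Nat.mul_le_mul_left R hc
      rw [Nat.mul_succ] at h3
      omega
    omega

theorem mod_eq_sub_block {R : Nat} (_hR : 0 < R) {p x : Nat} (h : x / R = p) : x % R = x - R * p := by
  have h1 := Nat.div_add_mod x R
  rw [h] at h1
  omega

theorem div_lt_B {R B x : Nat} (hR : 0 < R) (hx : x < R * B) : x / R < B := by
  rw [Nat.div_lt_iff_lt_mul hR, Nat.mul_comm]
  exact hx
  
-- ---------- characterisation of the pattern stamp ----------
def apN (pat : List (List (Option Int))) (R a c : Nat) (g : List (List (Option Int))) :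
    List (List (Option Int)) :=
  (List.range R).foldl (fun g u =>
    (List.range R).foldl (fun g v => aset g (a + u) (c + v) (aget none pat u v)) g) g

theorem applyPatP_eq_apN (pat : List (List (Option Int))) (R : Nat) (a c : Nat)
    (g : List (List (Option Int))) :
    applyPatP (R : Int) pat (a : Int) (c : Int) g = apN pat R a c g := by
  unfold applyPatP apN
  rw [PySem.List.pyRange_one, show ((R : Int) - 0).toNat = R by omega, List.foldl_map]
  refine PySem.List.foldl_congr_mem _ _ _ _ ?_
  intro acc u _
  rw [List.foldl_map]
  refine PySem.List.foldl_congr_mem _ _ _ _ ?_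
  intro acc' v _
  have h1 : (a : Int) + (0 + (u : Int)) = ((a + u : Nat) : Int) := by push_cast; ring
  have h2 : (c : Int) + (0 + (v : Int)) = ((c + v : Nat) : Int) := by push_cast; ring
  have h3 : (0 : Int) + (u : Int) = ((u : Nat) : Int) := by ring
  have h4 : (0 : Int) + (v : Int) = ((v : Nat) : Int) := by ring
  rw [h1, h2, h3, h4, PySem.List.pySetD_natCast, PySem.List.pyGetD_natCast,
    PySem.List.pySetD_natCast, PySem.List.pyGetD_natCast, PySem.List.pyGetD_natCast]
  rfl

theorem rowAp_spec {pat : List (List (Option Int))} {N : Nat} (u a c : Nat) :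
    ∀ (k : Nat) (g : List (List (Option Int))), g.length = N → (∀ row ∈ g, row.length = N) →
    a + u < N → c + k ≤ N →
    ((List.range k).foldl (fun g v => aset g (a + u) (c + v) (aget none pat u v)) g).length = N ∧
    (∀ row ∈ (List.range k).foldl (fun g v => aset g (a + u) (c + v) (aget none pat u v)) g,
      row.length = N) ∧
    ∀ x y, aget none ((List.range k).foldl (fun g v => aset g (a + u) (c + v) (aget none pat u v)) g) x y =
      if x = a + u ∧ c ≤ y ∧ y < c + k then aget none pat u (y - c) else aget none g x y := by
  intro k
  induction k with
  | zero =>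
    intro g h1 h2 h3 h4
    refine ⟨h1, h2, ?_⟩
    intro x y
    rw [if_neg (by omega)]
    simp
  | succ k ih =>
    intro g h1 h2 h3 h4
    obtain ⟨ih1, ih2, ih3⟩ := ih g h1 h2 h3 (by omega)
    rw [List.range_succ, List.foldl_append]
    set g' := (List.range k).foldl (fun g v => aset g (a + u) (c + v) (aget none pat u v)) g with hg'
    simp only [List.foldl_cons, List.foldl_nil]
    have hxlt : a + u < g'.length := by omega
    have hrowlen : (g'.getD (a + u) []).length = N := by
      rw [getD_elem _ hxlt]
      exact ih2 _ (List.getElem_mem hxlt)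
    refine ⟨by rw [length_aset]; exact ih1, rows_aset ih2 _ _ hxlt, ?_⟩
    intro x y
    by_cases hx : x = a + u ∧ y = c + k
    · rw [hx.1, hx.2, aget_aset_self hxlt (by omega), if_pos (by omega)]
      have hyc : c + k - c = k := by omega
      rw [hyc]
    · rw [aget_aset_ne _ _ _ (by tauto), ih3]
      by_cases hcond : x = a + u ∧ c ≤ y ∧ y < c + k
      · rw [if_pos hcond, if_pos (by omega)]
      · rw [if_neg hcond, if_neg (by omega)]

theorem apN_spec {pat : List (List (Option Int))} {N : Nat} (R a c : Nat) :
    ∀ (t : Nat) (g : List (List (Option Int))), g.length = N → (∀ row ∈ g, row.length = N) →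
    a + t ≤ N → c + R ≤ N →
    ((List.range t).foldl (fun g u =>
        (List.range R).foldl (fun g v => aset g (a + u) (c + v) (aget none pat u v)) g) g).length = N ∧
    (∀ row ∈ (List.range t).foldl (fun g u =>
        (List.range R).foldl (fun g v => aset g (a + u) (c + v) (aget none pat u v)) g) g,
      row.length = N) ∧
    ∀ x y, aget none ((List.range t).foldl (fun g u =>
        (List.range R).foldl (fun g v => aset g (a + u) (c + v) (aget none pat u v)) g) g) x y =
      if a ≤ x ∧ x < a + t ∧ c ≤ y ∧ y < c + R then aget none pat (x - a) (y - c)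
      else aget none g x y := by
  intro t
  induction t with
  | zero =>
    intro g h1 h2 h3 h4
    refine ⟨h1, h2, ?_⟩
    intro x y
    rw [if_neg (by omega)]
    simp
  | succ t ih =>
    intro g h1 h2 h3 h4
    obtain ⟨ih1, ih2, ih3⟩ := ih g h1 h2 (by omega) h4
    rw [List.range_succ, List.foldl_append]
    set g' := (List.range t).foldl (fun g u =>
      (List.range R).foldl (fun g v => aset g (a + u) (c + v) (aget none pat u v)) g) g with hg'
    simp only [List.foldl_cons, List.foldl_nil]
    obtain ⟨r1, r2, r3⟩ := rowAp_spec t a c R g' ih1 ih2 (by omega) h4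
    refine ⟨r1, r2, ?_⟩
    intro x y
    rw [r3]
    by_cases hx : x = a + t ∧ c ≤ y ∧ y < c + R
    · rw [if_pos hx, if_pos (by omega)]
      have hxa : x - a = t := by omega
      rw [hxa]
    · rw [if_neg hx, ih3]
      by_cases hcond : a ≤ x ∧ x < a + t ∧ c ≤ y ∧ y < c + R
      · rw [if_pos hcond, if_pos (by omega)]
      · rw [if_neg hcond, if_neg (by omega)]

-- ---------- the coupled invariant ----------
def CInv (patterns : List (List (List (Option Int)))) (R B bi bj : Nat)
    (g : List (List (Option Int))) (M : List (List Int)) (i : Int) : Prop :=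
  g.length = R * B ∧ (∀ row ∈ g, row.length = R * B) ∧
  M.length = B ∧ (∀ row ∈ M, row.length = B) ∧ (∀ row ∈ M, ∀ v ∈ row, 0 ≤ v) ∧
  0 ≤ i ∧ i < (patterns.length : Int) ∧
  ∀ x y, x < R * B → y < R * B →
    aget none g x y =
      if min (x / R) (y / R) < bi ∨ (min (x / R) (y / R) = bi ∧ max (x / R) (y / R) < bj)
      then aget none (patterns.getD (aget 0 M (x / R) (y / R)).toNat []) (x % R) (y % R)
      else none

theorem apN_props {pat : List (List (Option Int))} {N : Nat} (R a c : Nat)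
    (g : List (List (Option Int))) (h1 : g.length = N) (h2 : ∀ row ∈ g, row.length = N)
    (h3 : a + R ≤ N) (h4 : c + R ≤ N) :
    (apN pat R a c g).length = N ∧ (∀ row ∈ apN pat R a c g, row.length = N) ∧
    ∀ x y, aget none (apN pat R a c g) x y =
      if a ≤ x ∧ x < a + R ∧ c ≤ y ∧ y < c + R then aget none pat (x - a) (y - c)
      else aget none g x y := by
  unfold apN
  exact apN_spec R a c R g h1 h2 h3 h4

theorem nonneg_aset {M : List (List Int)} (h : ∀ row ∈ M, ∀ v ∈ row, 0 ≤ v) {p q : Nat}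
    {w : Int} (hw : 0 ≤ w) : ∀ row ∈ aset M p q w, ∀ v ∈ row, 0 ≤ v := by
  intro row hrow v hv
  rcases List.mem_or_eq_of_mem_set hrow with h1 | h1
  · exact h row h1 v hv
  · subst h1
    rcases List.mem_or_eq_of_mem_set hv with h2 | h2
    · rcases getD_mem_or_nil M p with hm | hm
      · exact h _ hm v h2
      · rw [hm] at h2
        simp at h2
    · omega

theorem step_coupled {patterns : List (List (List (Option Int)))} {R B : Nat} (hR : 0 < R)
    (hm : patterns ≠ []) {bi bj : Nat} (hij : bi ≤ bj) (hjB : bj < B)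
    {g : List (List (Option Int))} {M : List (List Int)} {i : Int}
    (hInv : CInv patterns R B bi bj g M i) :
    (bodyA patterns (R : Int) (g, i) ((R : Int) * bi) ((R : Int) * bj)).2 =
      (bodyB (patterns.length : Int) (M, i) (bi : Int) (bj : Int)).2 ∧
    CInv patterns R B bi (bj + 1)
      (bodyA patterns (R : Int) (g, i) ((R : Int) * bi) ((R : Int) * bj)).1
      (bodyB (patterns.length : Int) (M, i) (bi : Int) (bj : Int)).1
      (bodyA patterns (R : Int) (g, i) ((R : Int) * bi) ((R : Int) * bj)).2 := by
  obtain ⟨hg1, hg2, hM1, hM2, hM0, hi0, him, hcell⟩ := hInv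
  have hmI : (0 : Int) < (patterns.length : Int) := by
    have := List.length_pos_iff.mpr hm
    exact_mod_cast this
  refine ⟨rfl, ?_⟩
  unfold bodyA bodyB
  dsimp only
  rw [PySem.List.pyGetD_of_nonneg patterns [] hi0]
  have hcast1 : (R : Int) * (bi : Int) = ((R * bi : Nat) : Int) := by push_cast; ring
  have hcast2 : (R : Int) * (bj : Int) = ((R * bj : Nat) : Int) := by push_cast; ring
  rw [hcast1, hcast2, applyPatP_eq_apN, applyPatP_eq_apN]
  rw [PySem.List.pySetD_natCast, PySem.List.pyGetD_natCast, PySem.List.pySetD_natCast,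
    PySem.List.pyGetD_natCast, PySem.List.pySetD_natCast, PySem.List.pySetD_natCast]
  set pat := patterns.getD i.toNat [] with hpat
  have e1 : aset M bi bj i = M.set bi ((M.getD bi []).set bj i) := rfl
  rw [← e1]
  have e2 : aset (aset M bi bj i) bj bi i =
      (aset M bi bj i).set bj (((aset M bi bj i).getD bj []).set bi i) := rfl
  rw [← e2]
  set t2 := aset (aset M bi bj i) bj bi i with ht2
  -- bounds for the two stamps
  have hble : R * bi + R ≤ R * B := by
    have := Nat.mul_le_mul_left R (by omega : bi + 1 ≤ B)
    rw [Nat.mul_succ] at this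
    omega
  have hble' : R * bj + R ≤ R * B := by
    have := Nat.mul_le_mul_left R (by omega : bj + 1 ≤ B)
    rw [Nat.mul_succ] at this
    omega
  -- table facts
  have hlen1 : (aset M bi bj i).length = B := by rw [length_aset, hM1]
  have hrows1 : ∀ row ∈ aset M bi bj i, row.length = B :=
    rows_aset hM2 bj i (by omega)
  have hlen2 : t2.length = B := by rw [ht2, length_aset, hlen1]
  have hrows2 : ∀ row ∈ t2, row.length = B :=
    rows_aset hrows1 bi i (by omega)
  have hnn2 : ∀ row ∈ t2, ∀ v ∈ row, 0 ≤ v :=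
    nonneg_aset (nonneg_aset hM0 hi0) hi0
  have ht2get : ∀ p' q', p' < B → q' < B →
      aget 0 t2 p' q' =
        if (p' = bi ∧ q' = bj) ∨ (p' = bj ∧ q' = bi) then i else aget 0 M p' q' := by
    intro p' q' hp' hq'
    by_cases hc1 : p' = bj ∧ q' = bi
    · have hrow : ((aset M bi bj i).getD bj []).length = B := by
        rw [getD_elem _ (by omega)]
        exact hrows1 _ (List.getElem_mem _)
      rw [hc1.1, hc1.2, ht2, aget_aset_self (by omega) (by omega)]
      rw [if_pos (Or.inr ⟨rfl, rfl⟩)]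
    · rw [ht2, aget_aset_ne _ _ _ (by tauto)]
      by_cases hc2 : p' = bi ∧ q' = bj
      · have hrow : (M.getD bi []).length = B := by
          rw [getD_elem _ (by omega)]
          exact hM2 _ (List.getElem_mem _)
        rw [hc2.1, hc2.2, aget_aset_self (by omega) (by omega)]
        rw [if_pos (Or.inl ⟨rfl, rfl⟩)]
      · rw [aget_aset_ne _ _ _ (by tauto), if_neg (by tauto)]
  by_cases hbij : bi = bj
  · -- diagonal block: single stamp
    subst hbij
    rw [if_neg (by simp)]
    obtain ⟨hA1, hA2, hA3⟩ := apN_props R (R * bi) (R * bi) g hg1 hg2 hble hble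
    refine ⟨hA1, hA2, hlen2, hrows2, hnn2,
      PySem.Int.mod_nonneg _ hmI, PySem.Int.mod_lt _ hmI, ?_⟩
    intro x y hx hy
    have hpB : x / R < B := div_lt_B hR hx
    have hqB : y / R < B := div_lt_B hR hy
    rw [hA3]
    by_cases hpq : x / R = bi ∧ y / R = bi
    · have hbx := (div_eq_iff_block hR bi x).mp hpq.1
      have hby := (div_eq_iff_block hR bi y).mp hpq.2
      rw [if_pos (by omega), if_pos (by omega : min (x / R) (y / R) < bi ∨
        min (x / R) (y / R) = bi ∧ max (x / R) (y / R) < bi + 1)]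
      rw [ht2get _ _ hpB hqB, if_pos (Or.inl ⟨hpq.1, hpq.2⟩)]
      rw [mod_eq_sub_block hR hpq.1, mod_eq_sub_block hR hpq.2]
    · have hnb : ¬(R * bi ≤ x ∧ x < R * bi + R ∧ R * bi ≤ y ∧ y < R * bi + R) := by
        intro hc
        exact hpq ⟨(div_eq_iff_block hR bi x).mpr ⟨hc.1, hc.2.1⟩,
          (div_eq_iff_block hR bi y).mpr ⟨hc.2.2.1, hc.2.2.2⟩⟩
      rw [if_neg hnb, ht2get _ _ hpB hqB,
        if_neg (show ¬((x / R = bi ∧ y / R = bi) ∨ (x / R = bi ∧ y / R = bi)) by tauto),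
        hcell x y hx hy]
      have hiff : (min (x / R) (y / R) < bi ∨
          min (x / R) (y / R) = bi ∧ max (x / R) (y / R) < bi) ↔
          (min (x / R) (y / R) < bi ∨
          min (x / R) (y / R) = bi ∧ max (x / R) (y / R) < bi + 1) := by
        omega
      rw [if_congr hiff rfl rfl]
  · -- off-diagonal: two mirrored stamps
    rw [if_pos (by
      simp only [ne_eq, Nat.cast_inj]
      exact fun h => hbij (Nat.eq_of_mul_eq_mul_left hR h))]
    obtain ⟨hA1, hA2, hA3⟩ := apN_props R (R * bi) (R * bj) g hg1 hg2 hble hble'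
    obtain ⟨hB1, hB2, hB3⟩ := apN_props R (R * bj) (R * bi)
      (apN pat R (R * bi) (R * bj) g) hA1 hA2 hble' hble
    refine ⟨hB1, hB2, hlen2, hrows2, hnn2,
      PySem.Int.mod_nonneg _ hmI, PySem.Int.mod_lt _ hmI, ?_⟩
    intro x y hx hy
    have hpB : x / R < B := div_lt_B hR hx
    have hqB : y / R < B := div_lt_B hR hy
    rw [hB3]
    by_cases hpq2 : x / R = bj ∧ y / R = bi
    · have hbx := (div_eq_iff_block hR bj x).mp hpq2.1
      have hby := (div_eq_iff_block hR bi y).mp hpq2.2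
      rw [if_pos (by omega), if_pos (by omega : min (x / R) (y / R) < bi ∨
        min (x / R) (y / R) = bi ∧ max (x / R) (y / R) < bj + 1)]
      rw [ht2get _ _ hpB hqB, if_pos (Or.inr ⟨hpq2.1, hpq2.2⟩)]
      rw [mod_eq_sub_block hR hpq2.1, mod_eq_sub_block hR hpq2.2]
    · have hnb2 : ¬(R * bj ≤ x ∧ x < R * bj + R ∧ R * bi ≤ y ∧ y < R * bi + R) := by
        intro hc
        exact hpq2 ⟨(div_eq_iff_block hR bj x).mpr ⟨hc.1, hc.2.1⟩,
          (div_eq_iff_block hR bi y).mpr ⟨hc.2.2.1, hc.2.2.2⟩⟩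
      rw [if_neg hnb2, hA3]
      by_cases hpq1 : x / R = bi ∧ y / R = bj
      · have hbx := (div_eq_iff_block hR bi x).mp hpq1.1
        have hby := (div_eq_iff_block hR bj y).mp hpq1.2
        rw [if_pos (by omega), if_pos (by omega : min (x / R) (y / R) < bi ∨
          min (x / R) (y / R) = bi ∧ max (x / R) (y / R) < bj + 1)]
        rw [ht2get _ _ hpB hqB, if_pos (Or.inl ⟨hpq1.1, hpq1.2⟩)]
        rw [mod_eq_sub_block hR hpq1.1, mod_eq_sub_block hR hpq1.2]
      · have hnb1 : ¬(R * bi ≤ x ∧ x < R * bi + R ∧ R * bj ≤ y ∧ y < R * bj + R) := by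
          intro hc
          exact hpq1 ⟨(div_eq_iff_block hR bi x).mpr ⟨hc.1, hc.2.1⟩,
            (div_eq_iff_block hR bj y).mpr ⟨hc.2.2.1, hc.2.2.2⟩⟩
        rw [if_neg hnb1, ht2get _ _ hpB hqB,
          if_neg (show ¬((x / R = bi ∧ y / R = bj) ∨ (x / R = bj ∧ y / R = bi)) by tauto),
          hcell x y hx hy]
        have hiff : (min (x / R) (y / R) < bi ∨
            min (x / R) (y / R) = bi ∧ max (x / R) (y / R) < bj) ↔
            (min (x / R) (y / R) < bi ∨
            min (x / R) (y / R) = bi ∧ max (x / R) (y / R) < bj + 1) := by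
          omega
        rw [if_congr hiff rfl rfl]

theorem Inv_row_end {patterns : List (List (List (Option Int)))} {R B bi : Nat} (hR : 0 < R)
    {g : List (List (Option Int))} {M : List (List Int)} {i : Int}
    (h : CInv patterns R B bi B g M i) : CInv patterns R B (bi + 1) (bi + 1) g M i := by
  obtain ⟨h1, h2, h3, h4, h5, h6, h7, h8⟩ := h
  refine ⟨h1, h2, h3, h4, h5, h6, h7, ?_⟩
  intro x y hx hy
  rw [h8 x y hx hy]
  have hp := div_lt_B hR hx
  have hq := div_lt_B hR hy
  have : (min (x / R) (y / R) < bi ∨ min (x / R) (y / R) = bi ∧ max (x / R) (y / R) < B) ↔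
      (min (x / R) (y / R) < bi + 1 ∨ min (x / R) (y / R) = bi + 1 ∧ max (x / R) (y / R) < bi + 1) := by
    omega
  rw [if_congr this rfl rfl]

theorem row_coupled {patterns : List (List (List (Option Int)))} {R B : Nat} (hR : 0 < R)
    (hm : patterns ≠ []) :
    ∀ (s : Nat) {bi bj : Nat} {g : List (List (Option Int))} {M : List (List Int)} {i : Int},
    bi ≤ bj → bj + s = B → CInv patterns R B bi bj g M i →
    ((List.range' bj s).foldl (fun st (bj' : Nat) => bodyA patterns (R : Int) st ((R : Int) * bi) ((R : Int) * bj')) (g, i)).2 =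
      ((List.range' bj s).foldl (fun st (bj' : Nat) => bodyB (patterns.length : Int) st (bi : Int) (bj' : Int)) (M, i)).2 ∧
    CInv patterns R B bi B
      ((List.range' bj s).foldl (fun st (bj' : Nat) => bodyA patterns (R : Int) st ((R : Int) * bi) ((R : Int) * bj')) (g, i)).1
      ((List.range' bj s).foldl (fun st (bj' : Nat) => bodyB (patterns.length : Int) st (bi : Int) (bj' : Int)) (M, i)).1
      ((List.range' bj s).foldl (fun st (bj' : Nat) => bodyA patterns (R : Int) st ((R : Int) * bi) ((R : Int) * bj')) (g, i)).2 := by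
  intro s
  induction s with
  | zero =>
    intro bi bj g M i hij hjs hInv
    have hbj : bj = B := by omega
    subst hbj
    exact ⟨rfl, hInv⟩
  | succ s ih =>
    intro bi bj g M i hij hjs hInv
    rw [List.range'_succ]
    simp only [List.foldl_cons]
    obtain ⟨h2eq, hInv'⟩ := step_coupled hR hm hij (by omega) hInv
    have hBpair : bodyB (patterns.length : Int) (M, i) (bi : Int) (bj : Int) =
        ((bodyB (patterns.length : Int) (M, i) (bi : Int) (bj : Int)).1,
         (bodyA patterns (R : Int) (g, i) ((R : Int) * bi) ((R : Int) * bj)).2) := by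
      rw [h2eq]
    rw [hBpair]
    exact ih (by omega) (by omega) hInv'
theorem outer_coupled {patterns : List (List (List (Option Int)))} {R B : Nat} (hR : 0 < R)
    (hm : patterns ≠ []) :
    ∀ (t : Nat) {bi : Nat} {g : List (List (Option Int))} {M : List (List Int)} {i : Int},
    bi + t = B → CInv patterns R B bi bi g M i →
    ((List.range' bi t).foldl (fun st (bi' : Nat) => (List.range' bi' (B - bi')).foldl
        (fun st (bj : Nat) => bodyA patterns (R : Int) st ((R : Int) * bi') ((R : Int) * bj)) st) (g, i)).2 =
      ((List.range' bi t).foldl (fun st (bi' : Nat) => (List.range' bi' (B - bi')).foldl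
        (fun st (bj : Nat) => bodyB (patterns.length : Int) st (bi' : Int) (bj : Int)) st) (M, i)).2 ∧
    CInv patterns R B B B
      ((List.range' bi t).foldl (fun st (bi' : Nat) => (List.range' bi' (B - bi')).foldl
        (fun st (bj : Nat) => bodyA patterns (R : Int) st ((R : Int) * bi') ((R : Int) * bj)) st) (g, i)).1
      ((List.range' bi t).foldl (fun st (bi' : Nat) => (List.range' bi' (B - bi')).foldl
        (fun st (bj : Nat) => bodyB (patterns.length : Int) st (bi' : Int) (bj : Int)) st) (M, i)).1
      ((List.range' bi t).foldl (fun st (bi' : Nat) => (List.range' bi' (B - bi')).foldl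
        (fun st (bj : Nat) => bodyA patterns (R : Int) st ((R : Int) * bi') ((R : Int) * bj)) st) (g, i)).2 := by
  intro t
  induction t with
  | zero =>
    intro bi g M i hbt hInv
    have hbi : bi = B := by omega
    subst hbi
    exact ⟨rfl, hInv⟩
  | succ t ih =>
    intro bi g M i hbt hInv
    rw [List.range'_succ]
    simp only [List.foldl_cons]
    obtain ⟨h2eq, hInv'⟩ := row_coupled hR hm (B - bi) (le_refl bi) (by omega) hInv
    have hInv'' := Inv_row_end hR hInv'
    have hBpair : ((List.range' bi (B - bi)).foldl
        (fun st (bj : Nat) => bodyB (patterns.length : Int) st (bi : Int) (bj : Int)) (M, i)) =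
        (((List.range' bi (B - bi)).foldl
          (fun st (bj : Nat) => bodyB (patterns.length : Int) st (bi : Int) (bj : Int)) (M, i)).1,
         ((List.range' bi (B - bi)).foldl
          (fun st (bj : Nat) => bodyA patterns (R : Int) st ((R : Int) * bi) ((R : Int) * bj)) (g, i)).2) := by
      rw [h2eq]
    rw [hBpair]
    exact ih (by omega) hInv''
-- ---------- port-to-fold bridges ----------
theorem pyRange_conv1 {r n : Int} {R N B : Nat} (hR : (R : Int) = r) (hN : (N : Int) = n)
    (hRpos : 0 < R) (hNRB : N = R * B) :
    PySem.List.pyRange 0 n r = (List.range B).map (fun k : Nat => r * (k : Int)) := by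
  rw [PySem.List.pyRange_of_pos 0 n (by omega)]
  by_cases hn0 : 0 < n
  · rw [if_pos (by omega)]
    have hco : n - 0 + r - 1 = (r - 1) + (B : Int) * r := by
      rw [← hN, ← hR]
      push_cast [hNRB]
      ring
    rw [hco, Int.add_mul_ediv_right _ _ (by omega : r ≠ 0),
      Int.ediv_eq_zero_of_lt (by omega) (by omega)]
    simp only [Int.zero_add, Int.toNat_natCast]
  · rw [if_neg (by omega)]
    have hN0 : N = 0 := by omega
    have hB0 : B = 0 := by
      rcases Nat.mul_eq_zero.mp (hNRB ▸ hN0) with h | h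
      · omega
      · exact h
    rw [hB0]
    simp

theorem pyRange_conv2 {r n : Int} {R N B : Nat} (hR : (R : Int) = r) (hN : (N : Int) = n)
    (hRpos : 0 < R) (hNRB : N = R * B) (bi : Nat) (hbi : bi < B) :
    PySem.List.pyRange (r * (bi : Int)) n r =
      (List.range (B - bi)).map (fun k => r * ((bi + k : Nat) : Int)) := by
  rw [PySem.List.pyRange_of_pos _ n (by omega)]
  have hRI : (0 : Int) < (R : Int) := by exact_mod_cast hRpos
  have hlt : r * (bi : Int) < n := by
    rw [← hN, ← hR]
    have hbI : (bi : Int) < (B : Int) := by exact_mod_cast hbi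
    have := mul_lt_mul_of_pos_left hbI hRI
    push_cast [hNRB]
    linarith
  rw [if_pos hlt]
  have hco : n - r * (bi : Int) + r - 1 = (r - 1) + ((B - bi : Nat) : Int) * r := by
    rw [← hN, ← hR]
    push_cast [hNRB, Nat.cast_sub (le_of_lt hbi)]
    ring
  rw [hco, Int.add_mul_ediv_right _ _ (by omega : r ≠ 0),
    Int.ediv_eq_zero_of_lt (by omega) (by omega)]
  simp only [Int.zero_add, Int.toNat_natCast]
  apply List.map_congr_left
  intro k _
  push_cast
  ring

theorem const_map_conv {alpha : Type} (v : alpha) {b : Int} {B : Nat} (hB : (B : Int) = b) :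
    (PySem.List.pyRange 0 b 1).map (fun _ => PySem.List.pyRepeat [v] b) =
      List.replicate B (List.replicate B v) := by
  rw [PySem.List.pyRange_one, List.map_map]
  rw [show ((fun _ => PySem.List.pyRepeat [v] b) ∘ fun k : Nat => (0 : Int) + (k : Int)) =
    Function.const Nat (PySem.List.pyRepeat [v] b) from rfl]
  rw [List.map_const, List.length_range, PySem.List.pyRepeat_singleton]
  have h1 : (b - 0).toNat = B := by omega
  have h2 : b.toNat = B := by omega
  rw [h1, h2]

theorem pyRangeB0 (B : Nat) :
    PySem.List.pyRange 0 (B : Int) 1 = (List.range B).map (fun k : Nat => (k : Int)) := by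
  rw [PySem.List.pyRange_one]
  simp

theorem pyRangeBbi {B bi : Nat} (h : bi ≤ B) :
    PySem.List.pyRange (bi : Int) (B : Int) 1 =
      (List.range (B - bi)).map (fun k : Nat => ((bi + k : Nat) : Int)) := by
  rw [PySem.List.pyRange_one, show ((B : Int) - (bi : Int)).toNat = B - bi by omega]
  apply List.map_congr_left
  intro k _
  push_cast
  ring

theorem replicateA_folds {patterns : List (List (List (Option Int)))} {r n : Int} {R N B : Nat}
    (hR : (R : Int) = r) (hN : (N : Int) = n) (hRpos : 0 < R) (hNRB : N = R * B) :
    replicate patterns r n =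
      ((List.range' 0 B).foldl (fun st (bi : Nat) => (List.range' bi (B - bi)).foldl
          (fun st (bj : Nat) => bodyA patterns r st (r * (bi : Int)) (r * (bj : Int))) st)
        (List.replicate N (List.replicate N (none : Option Int)), (0 : Int))).1 := by
  unfold replicate
  have hmod : PySem.Int.mod n r = 0 := (PySem.Int.mod_eq_zero_iff_dvd n r).mpr
    ⟨B, by rw [← hN, ← hR]; push_cast [hNRB]; ring⟩
  rw [if_neg (by simp [hmod])]
  rw [const_map_conv (none : Option Int) hN]
  rw [pyRange_conv1 hR hN hRpos hNRB, List.foldl_map]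
  have hconv := PySem.List.foldl_congr_mem (List.range B)
    (fun st (bi : Nat) => (PySem.List.pyRange (r * (bi : Int)) n r).foldl
      (fun st j => bodyA patterns r st (r * (bi : Int)) j) st)
    (fun st (bi : Nat) => (List.range' bi (B - bi)).foldl
      (fun st (bj : Nat) => bodyA patterns r st (r * (bi : Int)) (r * (bj : Int))) st)
    (List.replicate N (List.replicate N (none : Option Int)), (0 : Int))
    (by
      intro acc bi hbi
      dsimp only
      rw [pyRange_conv2 hR hN hRpos hNRB bi (List.mem_range.mp hbi), List.foldl_map,
        List.range'_eq_map_range, List.foldl_map])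
  rw [hconv, List.range_eq_range']

theorem replicateB_folds {patterns : List (List (List (Option Int)))} {r n : Int} {R N B : Nat}
    (hR : (R : Int) = r) (hN : (N : Int) = n) (hRpos : 0 < R) (hNRB : N = R * B) :
    replicate_alt patterns r n =
      (let st := (List.range' 0 B).foldl (fun st (bi : Nat) => (List.range' bi (B - bi)).foldl
          (fun st (bj : Nat) => bodyB (patterns.length : Int) st (bi : Int) (bj : Int)) st)
        (List.replicate B (List.replicate B (0 : Int)), (0 : Int))
       (PySem.List.pyRange 0 n 1).map (fun x =>
        (PySem.List.pyRange 0 n 1).map (fun y =>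
          PySem.List.pyGetD (PySem.List.pyGetD
            (PySem.List.pyGetD patterns
              (PySem.List.pyGetD (PySem.List.pyGetD st.1 (PySem.Int.floordiv x r) [])
                (PySem.Int.floordiv y r) 0) [])
            (PySem.Int.mod x r) []) (PySem.Int.mod y r) none))) := by
  unfold replicate_alt
  have hmod : PySem.Int.mod n r = 0 := (PySem.Int.mod_eq_zero_iff_dvd n r).mpr
    ⟨B, by rw [← hN, ← hR]; push_cast [hNRB]; ring⟩
  rw [if_neg (by simp [hmod])]
  have hb : PySem.Int.floordiv n r = (B : Int) := by
    rw [PySem.Int.floordiv_eq_ediv_of_pos (by omega), ← hN, ← hR]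
    push_cast [hNRB]
    exact Int.mul_ediv_cancel_left _ (by exact_mod_cast hRpos.ne')
  simp only [hb]
  have htable : (PySem.List.pyRange 0 (B : Int) 1).map
      (fun _ => PySem.List.pyRepeat [(0 : Int)] (B : Int)) =
      List.replicate B (List.replicate B (0 : Int)) := const_map_conv _ rfl
  simp only [htable]
  have hst : (PySem.List.pyRange 0 (B : Int) 1).foldl (fun st bi =>
        (PySem.List.pyRange bi (B : Int) 1).foldl
          (fun st bj => bodyB (patterns.length : Int) st bi bj) st)
      (List.replicate B (List.replicate B (0 : Int)), (0 : Int)) =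
      (List.range' 0 B).foldl (fun st (bi : Nat) => (List.range' bi (B - bi)).foldl
          (fun st (bj : Nat) => bodyB (patterns.length : Int) st (bi : Int) (bj : Int)) st)
        (List.replicate B (List.replicate B (0 : Int)), (0 : Int)) := by
    rw [pyRangeB0, List.foldl_map]
    have hconv := PySem.List.foldl_congr_mem (List.range B)
      (fun st (bi : Nat) => (PySem.List.pyRange (bi : Int) (B : Int) 1).foldl
        (fun st bj => bodyB (patterns.length : Int) st (bi : Int) bj) st)
      (fun st (bi : Nat) => (List.range' bi (B - bi)).foldl
        (fun st (bj : Nat) => bodyB (patterns.length : Int) st (bi : Int) (bj : Int)) st)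
      (List.replicate B (List.replicate B (0 : Int)), (0 : Int))
      (by
        intro acc bi hbi
        dsimp only
        rw [pyRangeBbi (le_of_lt (List.mem_range.mp hbi)), List.foldl_map,
          List.range'_eq_map_range, List.foldl_map])
    rw [hconv, List.range_eq_range']
  simp only [hst]

-- ---------- degenerate cases and main case ----------
theorem applyPatP_nil (r : Int) (pat : List (List (Option Int))) (sx sy : Int) :
    applyPatP r pat sx sy [] = [] := by
  unfold applyPatP
  refine pvFoldlInv (P := fun g => g = []) _ _ _ rfl ?_
  intro g u hg
  refine pvFoldlInv (P := fun g => g = []) _ _ _ hg ?_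
  intro g' v hg'
  rw [hg', pySetD_nil]

theorem bodyA_nil {patterns : List (List (List (Option Int)))} {r : Int}
    (st : List (List (Option Int)) × Int) (i j : Int) (h : st.1 = []) :
    (bodyA patterns r st i j).1 = [] := by
  unfold bodyA
  dsimp only
  rw [h, applyPatP_nil]
  split
  · rw [applyPatP_nil]
  · rfl

theorem deg_A {patterns : List (List (List (Option Int)))} {r n : Int}
    (hmod : PySem.Int.mod n r = 0) (hn : n ≤ 0) : replicate patterns r n = [] := by
  unfold replicate
  rw [if_neg (by simp [hmod])]
  have hres : (PySem.List.pyRange 0 n 1).map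
      (fun _ => PySem.List.pyRepeat [(none : Option Int)] n) = [] := by
    rw [PySem.List.pyRange_one, show (n - 0).toNat = 0 by omega]
    simp
  rw [hres]
  refine pvFoldlInv (P := fun st : List (List (Option Int)) × Int => st.1 = []) _ _ _ rfl ?_
  intro st i hst
  refine pvFoldlInv (P := fun st : List (List (Option Int)) × Int => st.1 = []) _ _ _ hst ?_
  intro st' j hst'
  exact bodyA_nil st' i j hst'

theorem deg_B {patterns : List (List (List (Option Int)))} {r n : Int}
    (hmod : PySem.Int.mod n r = 0) (hn : n ≤ 0) : replicate_alt patterns r n = [] := by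
  unfold replicate_alt
  rw [if_neg (by simp [hmod])]
  rw [PySem.List.pyRange_one, show (n - 0).toNat = 0 by omega]
  simp

theorem CInv_init {patterns : List (List (List (Option Int)))} {R B N : Nat}
    (hm : patterns ≠ []) (_hRpos : 0 < R) (hNRB : N = R * B) :
    CInv patterns R B 0 0 (List.replicate N (List.replicate N (none : Option Int)))
      (List.replicate B (List.replicate B (0 : Int))) 0 := by
  refine ⟨?_, ?_, ?_, ?_, ?_, ?_, ?_, ?_⟩
  · rw [List.length_replicate]
    exact hNRB
  · intro row hrow
    rw [List.eq_of_mem_replicate hrow, List.length_replicate]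
    exact hNRB
  · exact List.length_replicate
  · intro row hrow
    rw [List.eq_of_mem_replicate hrow, List.length_replicate]
  · intro row hrow v hv
    rw [List.eq_of_mem_replicate hrow] at hv
    rw [List.eq_of_mem_replicate hv]
  · exact le_refl 0
  · exact_mod_cast List.length_pos_iff.mpr hm
  · intro x y hx hy
    rw [if_neg (by
      rintro (h | ⟨h1, h2⟩)
      · exact absurd h (Nat.not_lt_zero _)
      · exact absurd h2 (Nat.not_lt_zero _))]
    unfold aget
    rw [List.getD_replicate _ (show x < N by omega), List.getD_replicate _ (show y < N by omega)]

theorem main_case {patterns : List (List (List (Option Int)))} {r n : Int}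
    (hr : 0 < r) (hn : 0 < n) (hdvd : r ∣ n) (hm : patterns ≠ []) :
    replicate patterns r n = replicate_alt patterns r n := by
  set R := r.toNat with hRdef
  have hR : (R : Int) = r := Int.toNat_of_nonneg (by omega)
  set N := n.toNat with hNdef
  have hN : (N : Int) = n := Int.toNat_of_nonneg (by omega)
  have hRpos : 0 < R := by
    have h0 : (0 : Int) < (R : Int) := by rw [hR]; exact hr
    exact_mod_cast h0
  have hRdvd : R ∣ N := by
    rcases hdvd with ⟨c, hc⟩
    have hc0 : 0 ≤ c := by nlinarith
    refine ⟨c.toNat, ?_⟩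
    have h2 : (N : Int) = (R : Int) * (c.toNat : Int) := by
      rw [hN, hR, Int.toNat_of_nonneg hc0]
      exact hc
    exact_mod_cast h2
  set B := N / R with hBdef
  have hNRB : N = R * B := (Nat.mul_div_cancel' hRdvd).symm
  rw [replicateA_folds hR hN hRpos hNRB, replicateB_folds hR hN hRpos hNRB, ← hR]
  obtain ⟨heq, hinv⟩ := outer_coupled hRpos hm B (Nat.zero_add B) (CInv_init hm hRpos hNRB)
  obtain ⟨hg1, hg2, hM1, hM2, hM0, hi0, him, hcell⟩ := hinv
  dsimp only
  apply List.ext_getElem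
  · rw [hg1, List.length_map, PySem.List.length_pyRange_one]
    omega
  · intro x hx1 hx2
    have hxN : x < R * B := by rwa [hg1] at hx1
    rw [List.getElem_map, PySem.List.getElem_pyRange_one]
    apply List.ext_getElem
    · rw [List.length_map, PySem.List.length_pyRange_one]
      rw [hg2 _ (List.getElem_mem hx1)]
      omega
    · intro y hy1 hy2
      have hyN : y < R * B := by
        have hrl := hg2 _ (List.getElem_mem hx1)
        omega
      rw [List.getElem_map, PySem.List.getElem_pyRange_one]
      simp only [Int.zero_add]
      have hL : ∀ (h1 : x < _) (h2 : y < _),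
          ((((List.range' 0 B).foldl (fun st (bi' : Nat) => (List.range' bi' (B - bi')).foldl
            (fun st (bj : Nat) => bodyA patterns (R : Int) st ((R : Int) * bi') ((R : Int) * bj)) st)
            (List.replicate N (List.replicate N (none : Option Int)), (0 : Int))).1)[x]'h1)[y]'h2 =
          aget none ((List.range' 0 B).foldl (fun st (bi' : Nat) => (List.range' bi' (B - bi')).foldl
            (fun st (bj : Nat) => bodyA patterns (R : Int) st ((R : Int) * bi') ((R : Int) * bj)) st)
            (List.replicate N (List.replicate N (none : Option Int)), (0 : Int))).1 x y := by
        intro h1 h2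
        unfold aget
        rw [getD_elem _ h1, getD_elem _ h2]
      rw [hL, hcell x y hxN hyN,
        if_pos (show min (x / R) (y / R) < B ∨ _ from Or.inl (by
          have := div_lt_B hRpos hxN
          have := div_lt_B hRpos hyN
          omega))]
      simp only [PySem.Int.floordiv_natCast, PySem.Int.mod_natCast, PySem.List.pyGetD_natCast]
      have he : (0 : Int) ≤ ((((List.range' 0 B).foldl (fun st (bi' : Nat) =>
          (List.range' bi' (B - bi')).foldl
            (fun st (bj : Nat) => bodyB (patterns.length : Int) st (bi' : Int) (bj : Int)) st)
          (List.replicate B (List.replicate B (0 : Int)), (0 : Int))).1).getD (x / R) []).getD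
          (y / R) 0 :=
        aget_nonneg hM0 (x / R) (y / R)
      rw [PySem.List.pyGetD_of_nonneg patterns [] he]
      rfl

-- ===== VERDICT (by name: the statement is the Claim_ definition above) =====
theorem replicate_spec : Claim_equal_replicate := by
  intro patterns r n _hdom hpre
  obtain ⟨hr0, hmod, hpos, _hneg⟩ := hpre
  unfold Spec_replicate
  by_cases hn : 0 < n
  · obtain ⟨hr, hne, _⟩ := hpos hn
    exact main_case hr hn ((PySem.Int.mod_eq_zero_iff_dvd n r).mp hmod) hne
  · rw [deg_A hmod (by omega), deg_B hmod (by omega)]
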